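-- pv_equiv track=rewrite | github.com/thruston/python-tabulate | tabulate.py | counting_summary
-- ===== SOURCE A (Python) =====
-- import collections
--
-- def counting_summary(factors, n=5):
--     '''summarize different levels in a factor
--
--     >>> counting_summary('a b c d e f g h a b b b a c w'.split())
--     'b 4, a 3, c 2, d 1, e 1 (and 4 others...)'
--     '''
--     counter = collections.Counter(factors)
--     if all(x == 1 for x in counter.values()):
--         analysis = "All distinct."
--     else:
--         analysis = ', '.join(f'{k} {v}' for k, v in counter.most_common(n))
--         if len(counter) > n:
--             analysis += f' (and {len(counter)-n} others...)'
--
--     return analysis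
-- ===== SOURCE B (Python) =====
-- def counting_summary(factors, n=5):
--     """summarize different levels in a factor (bucket-grouping re-implementation)"""
--     counts = {}
--     for f in factors:
--         counts[f] = counts.get(f, 0) + 1
--     if all(c == 1 for c in counts.values()):
--         return "All distinct."
--     # group keys by their count, first-seen order preserved inside each bucket
--     buckets = {}
--     for k, v in counts.items():
--         buckets.setdefault(v, []).append(k)
--     ordered = []
--     for c in sorted(buckets, reverse=True):
--         ordered.extend((k, c) for k in buckets[c])
--     top = ordered[:max(n, 0)]
--     analysis = ", ".join(f"{k} {v}" for k, v in top)
--     if len(counts) > n: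
--         analysis += f" (and {len(counts) - n} others...)"
--     return analysis
-- ===== Notes on version B (the rewrite author's own statement) =====
-- stated objective: alternative
-- what changed: B builds the frequency table with a plain dict loop and replaces Counter.most_common(n)'s heap-based partial selection by grouping keys into count-buckets and walking the distinct counts in descending sorted order (stable, first-seen order inside each bucket), then slicing the first n.
import Mathlib
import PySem

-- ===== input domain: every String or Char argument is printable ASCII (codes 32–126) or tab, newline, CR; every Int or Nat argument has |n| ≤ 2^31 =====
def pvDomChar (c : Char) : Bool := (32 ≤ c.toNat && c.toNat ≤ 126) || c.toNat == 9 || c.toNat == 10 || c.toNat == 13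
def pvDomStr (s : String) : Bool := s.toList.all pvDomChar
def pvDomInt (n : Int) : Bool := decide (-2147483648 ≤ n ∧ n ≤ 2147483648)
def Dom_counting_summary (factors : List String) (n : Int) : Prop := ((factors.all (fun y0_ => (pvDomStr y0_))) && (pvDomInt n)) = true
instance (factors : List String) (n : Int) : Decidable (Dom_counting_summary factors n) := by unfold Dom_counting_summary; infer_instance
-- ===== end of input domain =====

-- B replaces Counter.most_common's partial selection by bucket-grouping the keys by their count and
-- walking the distinct counts in descending order (same return value; an alternative decomposition).

-- ===== PORT A =====
def counting_summary (factors : List String) (n : Int) : String :=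
  let counter := PySem.Dict.counter factors
  if counter.values.all (fun v => v == 1) then "All distinct."
  else
    -- counter.most_common(n): stable sort of the items by count descending, first n (n < 0 selects none)
    let top := if n < 0 then [] else
      (PySem.List.sorted counter.items (fun kv => kv.2) true).take n.toNat
    let analysis := PySem.Str.join ", " (top.map (fun kv => kv.1 ++ " " ++ PySem.Int.toStr kv.2))
    if ((PySem.Dict.size counter : Int) > n) then
      analysis ++ " (and " ++ PySem.Int.toStr ((PySem.Dict.size counter : Int) - n) ++ " others...)"
    else analysis

-- ===== PORT B =====
def counting_summary_alt (factors : List String) (n : Int) : String :=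
  let counts := factors.foldl (fun d f => d.insert f (d.getD f 0 + 1)) PySem.Dict.empty
  if counts.values.all (fun c => c == 1) then "All distinct."
  else
    let buckets := counts.items.foldl (fun b kv => b.modify kv.2 [] (· ++ [kv.1])) PySem.Dict.empty
    let ordered := (PySem.List.sorted buckets.keys (fun c => c) true).flatMap
      (fun c => (buckets.getD c []).map (fun k => (k, c)))
    let top := ordered.take (max n 0).toNat
    let analysis := PySem.Str.join ", " (top.map (fun kv => kv.1 ++ " " ++ PySem.Int.toStr kv.2))
    if ((PySem.Dict.size counts : Int) > n) then
      analysis ++ " (and " ++ PySem.Int.toStr ((PySem.Dict.size counts : Int) - n) ++ " others...)"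
    else analysis

-- ===== PRECONDITION & SPEC =====
def Spec_counting_summary (factors : List String) (n : Int) (out : String) : Prop := out = counting_summary_alt factors n
instance (factors : List String) (n : Int) (out : String) : Decidable (Spec_counting_summary factors n out) := by unfold Spec_counting_summary; infer_instance

-- ===== CLAIM (what is proved, stated in full; the proofs are below) =====
def Claim_equal_counting_summary : Prop := ∀ (factors : List String) (n : Int), Dom_counting_summary factors n → Spec_counting_summary factors n (counting_summary factors n)

-- ===== LEMMAS AND PROOFS =====

-- inserting past a prefix none of whose elements satisfies 'before'
lemma insertBy_append_not_before {α : Type} (before : α → α → Bool) (x : α) (pre l : List α)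
    (h : ∀ y ∈ pre, before x y = false) :
    PySem.List.insertBy before x (pre ++ l) = pre ++ PySem.List.insertBy before x l := by
  induction pre with
  | nil => rfl
  | cons y t ih =>
    simp only [List.cons_append, PySem.List.insertBy, h y (by simp)]
    simp [ih (fun z hz => h z (by simp [hz]))]

-- inserting in front of a list all of whose elements satisfy 'before'
lemma insertBy_all_before {α : Type} (before : α → α → Bool) (x : α) (l : List α)
    (h : ∀ y ∈ l, before x y = true) :
    PySem.List.insertBy before x l = x :: l := by
  cases l with
  | nil => rfl
  | cons y t => simp [PySem.List.insertBy, h y (by simp)]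

-- the distinct-key list sorted descending is strictly descending
lemma sorted_rev_ofList_pairwise_gt (l : List Int) :
    (PySem.List.sorted (PySem.Set.ofList l) (fun c => c) true).Pairwise (· > ·) := by
  have h1 := PySem.List.sorted_pairwise_rev (PySem.Set.ofList l) (fun c => c)
  have h2 : (PySem.List.sorted (PySem.Set.ofList l) (fun c => c) true).Nodup :=
    (PySem.List.sorted_perm (PySem.Set.ofList l) (fun c => c) true).symm.nodup
      (PySem.Set.nodup_ofList l)
  exact (h1.and h2).imp (fun hp => by omega)

-- the key of x already occurs in the (strictly descending) bucket-key list: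
-- stable insertion lands at the end of x's bucket
lemma insertBy_flatMap_mem {α : Type} (key : α → Int) (x : α) (ks : List Int) (f : Int → List α)
    (hks : ks.Pairwise (· > ·)) (hmem : key x ∈ ks) (hf : ∀ d, ∀ y ∈ f d, key y = d) :
    PySem.List.insertBy (fun a b => decide (key b < key a)) x (ks.flatMap f)
      = ks.flatMap (fun d => f d ++ if d = key x then [x] else []) := by
  induction ks with
  | nil => simp at hmem
  | cons k t ih =>
    have hkt : ∀ d ∈ t, k > d := fun d hd => (List.pairwise_cons.mp hks).1 d hd
    rw [List.flatMap_cons, List.flatMap_cons]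
    by_cases hk : k = key x
    · have hnt : key x ∉ t := fun hx => absurd (hkt _ hx) (by omega)
      rw [insertBy_append_not_before _ _ _ _
        (fun y hy => by rw [decide_eq_false_iff_not]; rw [hf k y hy, hk]; exact lt_irrefl _)]
      rw [insertBy_all_before _ _ _ (fun y hy => by
        obtain ⟨d, hd, hyd⟩ := List.mem_flatMap.mp hy
        rw [decide_eq_true_iff]; rw [hf d y hyd]; have := hkt d hd; omega)]
      have ht : t.flatMap (fun d => f d ++ if d = key x then [x] else []) = t.flatMap f := by
        apply List.flatMap_congr
        intro d hd
        rw [if_neg (fun h : d = key x => hnt (h ▸ hd))]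
        simp
      rw [ht, if_pos hk]; simp
    · have hmem' : key x ∈ t := by
        rcases List.mem_cons.mp hmem with h | h
        · exact absurd h.symm hk
        · exact h
      have hgt : k > key x := hkt _ hmem'
      rw [insertBy_append_not_before _ _ _ _
        (fun y hy => by rw [decide_eq_false_iff_not]; rw [hf k y hy]; omega)]
      rw [ih (List.pairwise_cons.mp hks).2 hmem']
      rw [if_neg hk]; simp

-- the key of x is new: stable insertion creates a singleton bucket at its sorted position
lemma insertBy_flatMap_not_mem {α : Type} (key : α → Int) (x : α) (ks : List Int) (f : Int → List α)
    (hks : ks.Pairwise (· > ·)) (hmem : key x ∉ ks) (hf : ∀ d, ∀ y ∈ f d, key y = d) :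
    PySem.List.insertBy (fun a b => decide (key b < key a)) x (ks.flatMap f)
      = (PySem.List.insertBy (fun a b => decide (b < a)) (key x) ks).flatMap
          (fun d => if d = key x then [x] else f d) := by
  induction ks with
  | nil => simp [PySem.List.insertBy]
  | cons k t ih =>
    have hkt : ∀ d ∈ t, k > d := fun d hd => (List.pairwise_cons.mp hks).1 d hd
    have hk : k ≠ key x := fun h => hmem (h ▸ List.mem_cons_self)
    have hnt : key x ∉ t := fun h => hmem (List.mem_cons_of_mem k h)
    by_cases hlt : k < key x
    · rw [insertBy_all_before _ _ _ (fun y hy => by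
        obtain ⟨d, hd, hyd⟩ := List.mem_flatMap.mp hy
        have hdk : d ≤ k := by
          rcases List.mem_cons.mp hd with h | h
          · omega
          · exact le_of_lt (hkt d h)
        rw [decide_eq_true_iff]; rw [hf d y hyd]; omega)]
      rw [show PySem.List.insertBy (fun a b => decide (b < a)) (key x) (k :: t) = key x :: k :: t by
        simp [PySem.List.insertBy, hlt]]
      have ht : t.flatMap (fun d => if d = key x then [x] else f d) = t.flatMap f := by
        apply List.flatMap_congr
        intro d hd
        rw [if_neg (fun h : d = key x => hnt (h ▸ hd))]
      simp only [List.flatMap_cons]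
      rw [if_neg hk, ht]
      simp
    · have hgt : k > key x := by omega
      rw [List.flatMap_cons, insertBy_append_not_before _ _ _ _
        (fun y hy => by rw [decide_eq_false_iff_not]; rw [hf k y hy]; omega)]
      rw [ih (List.pairwise_cons.mp hks).2 hnt]
      rw [show PySem.List.insertBy (fun a b => decide (b < a)) (key x) (k :: t)
            = k :: PySem.List.insertBy (fun a b => decide (b < a)) (key x) t by
        simp only [PySem.List.insertBy]
        rw [if_neg (by simp; omega)]]
      rw [List.flatMap_cons, if_neg hk]

-- MAIN: a stable reverse sort by an Int key is the concatenation of the key-buckets,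
-- buckets taken in descending key order, each bucket kept in the original order
lemma sorted_rev_eq_buckets {α : Type} (xs : List α) (key : α → Int) :
    PySem.List.sorted xs key true
      = (PySem.List.sorted (PySem.Set.ofList (xs.map key)) (fun c => c) true).flatMap
          (fun c => xs.filter (fun y => key y == c)) := by
  induction xs using List.reverseRecOn with
  | nil => rfl
  | append_singleton xs x ih =>
    have hf : ∀ d : Int, ∀ y ∈ xs.filter (fun y => key y == d), key y = d := by
      intro d y hy
      simpa using (List.mem_filter.mp hy).2
    have hks := sorted_rev_ofList_pairwise_gt (xs.map key)
    have hL : PySem.List.sorted (xs ++ [x]) key true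
        = PySem.List.insertBy (fun a b => decide (key b < key a)) x (PySem.List.sorted xs key true) := by
      rw [PySem.List.sorted_rev_eq_foldl_insertBy, List.foldl_append, List.foldl_cons, List.foldl_nil,
        ← PySem.List.sorted_rev_eq_foldl_insertBy]
    rw [hL, ih]
    rw [show (xs ++ [x]).map key = xs.map key ++ [key x] by simp]
    rw [PySem.Set.ofList_append_singleton]
    by_cases hm : key x ∈ PySem.Set.ofList (xs.map key)
    · rw [PySem.Set.add_of_mem hm]
      have hmem : key x ∈ PySem.List.sorted (PySem.Set.ofList (xs.map key)) (fun c => c) true := by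
        rw [PySem.List.mem_sorted]; exact hm
      rw [insertBy_flatMap_mem key x _ _ hks hmem hf]
      apply List.flatMap_congr
      intro d hd
      rw [List.filter_append]
      congr 1
      by_cases hdx : d = key x
      · rw [if_pos hdx]; simp [hdx]
      · rw [if_neg hdx]; simp; exact fun h => hdx h.symm
    · rw [PySem.Set.add_of_not_mem hm]
      have hmem : key x ∉ PySem.List.sorted (PySem.Set.ofList (xs.map key)) (fun c => c) true := by
        rw [PySem.List.mem_sorted]; exact hm
      have hxs : key x ∉ xs.map key := by
        intro h; exact hm (by rw [PySem.Set.mem_ofList]; exact h)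
      rw [insertBy_flatMap_not_mem key x _ _ hks hmem hf]
      have hS : PySem.List.sorted (PySem.Set.ofList (xs.map key) ++ [key x]) (fun c => c) true
          = PySem.List.insertBy (fun a b => decide (b < a)) (key x)
              (PySem.List.sorted (PySem.Set.ofList (xs.map key)) (fun c => c) true) := by
        rw [PySem.List.sorted_rev_eq_foldl_insertBy, List.foldl_append, List.foldl_cons, List.foldl_nil,
          ← PySem.List.sorted_rev_eq_foldl_insertBy]
      rw [hS]
      apply List.flatMap_congr
      intro d hd
      rw [List.filter_append]
      by_cases hdx : d = key x
      · rw [if_pos hdx]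
        have : xs.filter (fun y => key y == d) = [] := by
          rw [List.filter_eq_nil_iff]
          intro y hy hyd
          exact hxs (by rw [hdx] at hyd; simp at hyd; rw [← hyd]; exact List.mem_map_of_mem hy)
        rw [this]; simp [hdx]
      · rw [if_neg hdx]; simp; exact fun h => hdx h.symm

-- B's bucket dict: its key list is the set of counts, in first-seen order
lemma buckets_keys (items : List (String × Int)) :
    (items.foldl (fun b kv => b.modify kv.2 [] (· ++ [kv.1])) PySem.Dict.empty).keys
      = PySem.Set.ofList (items.map (fun kv => kv.2)) := by
  rw [PySem.Dict.keys_foldl_modify_key items (fun kv => kv.2) [] (fun _ kv l => l ++ [kv.1])]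
  rw [PySem.Dict.keys_empty, PySem.Set.update_nil_left]

-- B's bucket dict: the bucket of count c holds the keys with that count, in item order
lemma buckets_getD (items : List (String × Int)) (c : Int) :
    (items.foldl (fun b kv => b.modify kv.2 [] (· ++ [kv.1])) PySem.Dict.empty).getD c []
      = (items.filter (fun kv => kv.2 == c)).map (fun kv => kv.1) := by
  have h : items.foldl (fun b kv => b.modify kv.2 [] (· ++ [kv.1])) PySem.Dict.empty
      = (items.map Prod.swap).foldl (fun d p => d.modify p.1 [] (· ++ [p.2])) PySem.Dict.empty := by
    rw [List.foldl_map]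
    rfl
  rw [h, PySem.Dict.getD_foldl_modify_append]
  rw [List.filter_map, List.map_map]
  rfl

-- B's bucket walk produces exactly the stable count-descending order of the counter items
lemma ordered_eq_sorted (factors : List String) :
    ((PySem.List.sorted
        ((PySem.Dict.counter factors).items.foldl
          (fun b kv => b.modify kv.2 [] (· ++ [kv.1])) PySem.Dict.empty).keys (fun c => c) true).flatMap
      (fun c => (((PySem.Dict.counter factors).items.foldl
          (fun b kv => b.modify kv.2 [] (· ++ [kv.1])) PySem.Dict.empty).getD c []).map (fun k => (k, c))))
    = PySem.List.sorted (PySem.Dict.counter factors).items (fun kv => kv.2) true := by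
  rw [buckets_keys]
  rw [sorted_rev_eq_buckets (PySem.Dict.counter factors).items (fun kv => kv.2)]
  apply List.flatMap_congr
  intro c _
  rw [buckets_getD, List.map_map]
  have hid : ∀ kv ∈ (PySem.Dict.counter factors).items.filter (fun kv => kv.2 == c),
      ((fun k => (k, c)) ∘ (fun kv : String × Int => kv.1)) kv = id kv := by
    intro kv hkv
    have h2 : kv.2 = c := by simpa using (List.mem_filter.mp hkv).2
    simp [Function.comp, ← h2]
  rw [List.map_congr_left hid, List.map_id]

-- ===== VERDICT (by name: the statement is the Claim_ definition above) =====
theorem counting_summary_spec : Claim_equal_counting_summary := by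
  intro factors n _
  unfold Spec_counting_summary counting_summary counting_summary_alt
  rw [PySem.Dict.foldl_insert_getD_add_one_eq_counter]
  simp only [ordered_eq_sorted]
  by_cases hn : n < 0
  · simp [if_pos hn, Int.toNat_of_nonpos (by omega : max n 0 ≤ 0)]
  · simp [if_neg hn, max_eq_left (by omega : 0 ≤ n)]
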